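-- pv_equiv track=rewrite | github.com/jundi69/pccl | python/scratchspace/py/ring_reduce_impl_socket.py | compute_chunk_boundaries
-- ===== SOURCE A (Python) =====
-- world_size: int = 0
--
-- def compute_chunk_boundaries(length, world_size):
--     """
--     Partition a 1D array of 'length' into 'world_size' contiguous chunks.
--     Returns list of (start, end) for each chunk i.
--     """
--     base = length // world_size
--     remainder = length % world_size
--     boundaries = []
--     start = 0
--     for i in range(world_size):
--         size = base + (1 if i < remainder else 0)
--         end = start + size
--         boundaries.append((start, end))
--         start = end
--     return boundaries
-- ===== SOURCE B (Python) =====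
-- def compute_chunk_boundaries(length, world_size):
--     """
--     Partition a 1D array of 'length' into 'world_size' contiguous chunks.
--     Returns list of (start, end) for each chunk i.
--     Closed form: each boundary computed directly from i, no running accumulator.
--     """
--     base = length // world_size
--     remainder = length % world_size
--     return [(base * i + min(i, remainder), base * (i + 1) + min(i + 1, remainder))
--             for i in range(world_size)]
-- ===== Notes on version B (the rewrite author's own statement) =====
-- stated objective: alternative
-- what changed: Replaced the sequential running-start loop by an independent closed-form formula for each chunk boundary (start_i = base*i + min(i, remainder)), removing the accumulator.
import Mathlib
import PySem

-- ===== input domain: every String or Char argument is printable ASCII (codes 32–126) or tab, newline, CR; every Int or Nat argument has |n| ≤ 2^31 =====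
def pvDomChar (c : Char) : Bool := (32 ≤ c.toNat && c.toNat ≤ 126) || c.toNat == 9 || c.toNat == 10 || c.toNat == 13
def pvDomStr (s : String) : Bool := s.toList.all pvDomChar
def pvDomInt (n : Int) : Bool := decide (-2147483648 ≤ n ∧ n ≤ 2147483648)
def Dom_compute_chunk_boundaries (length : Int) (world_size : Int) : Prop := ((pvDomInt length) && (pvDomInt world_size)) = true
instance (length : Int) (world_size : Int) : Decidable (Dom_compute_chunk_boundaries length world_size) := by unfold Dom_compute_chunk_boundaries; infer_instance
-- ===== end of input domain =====

-- B replaces A's running-start accumulator loop by an independent closed-form boundary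
-- formula per index (alternative decomposition, same cost); Pre_ excludes world_size = 0,
-- where both Pythons raise ZeroDivisionError.


-- ===== PORT A =====
def compute_chunk_boundaries (length : Int) (world_size : Int) : List (Int × Int) :=
  let base := PySem.Int.floordiv length world_size
  let remainder := PySem.Int.mod length world_size
  let st := (PySem.List.pyRange 0 world_size 1).foldl
    (fun (st : List (Int × Int) × Int) i =>
      let size := base + (if i < remainder then 1 else 0)
      let endv := st.2 + size
      (st.1 ++ [(st.2, endv)], endv)) ([], 0)
  st.1

-- ===== PORT B =====
def compute_chunk_boundaries_alt (length : Int) (world_size : Int) : List (Int × Int) :=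
  let base := PySem.Int.floordiv length world_size
  let remainder := PySem.Int.mod length world_size
  (PySem.List.pyRange 0 world_size 1).map
    (fun i => (base * i + min i remainder, base * (i + 1) + min (i + 1) remainder))

-- ===== PRECONDITION & SPEC =====
-- Pre_ excludes exactly world_size = 0, where Python A raises ZeroDivisionError.
def Pre_compute_chunk_boundaries (length : Int) (world_size : Int) : Prop := world_size ≠ 0
instance (length : Int) (world_size : Int) : Decidable (Pre_compute_chunk_boundaries length world_size) := by unfold Pre_compute_chunk_boundaries; infer_instance
def pvWitness_compute_chunk_boundaries : Int × Int := (10, 3)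
def Spec_compute_chunk_boundaries (length : Int) (world_size : Int) (out : List (Int × Int)) : Prop := out = compute_chunk_boundaries_alt length world_size
instance (length : Int) (world_size : Int) (out : List (Int × Int)) : Decidable (Spec_compute_chunk_boundaries length world_size out) := by unfold Spec_compute_chunk_boundaries; infer_instance

-- ===== CLAIM (what is proved, stated in full; the proofs are below) =====
def Claim_equal_compute_chunk_boundaries : Prop := ∀ (length : Int) (world_size : Int), Dom_compute_chunk_boundaries length world_size → Pre_compute_chunk_boundaries length world_size → Spec_compute_chunk_boundaries length world_size (compute_chunk_boundaries length world_size)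

-- ===== LEMMAS AND PROOFS =====

-- Loop invariant: after folding over range(0, n) the accumulated list is the closed-form
-- map and the running start equals base*n + min(n, remainder).
theorem ccb_loop (b r : Int) (hr : 0 ≤ r) :
    ∀ n : Int, 0 ≤ n →
      (PySem.List.pyRange 0 n 1).foldl
        (fun (st : List (Int × Int) × Int) i =>
          let size := b + (if i < r then 1 else 0)
          let endv := st.2 + size
          (st.1 ++ [(st.2, endv)], endv)) ([], 0)
      = ((PySem.List.pyRange 0 n 1).map
           (fun i => (b * i + min i r, b * (i + 1) + min (i + 1) r)),
         b * n + min n r) := by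
  intro n hn
  induction n, hn using Int.le_induction with
  | base =>
      simp [PySem.List.pyRange_one_eq_nil (le_refl 0)]
      omega
  | succ n hn ih =>
      rw [PySem.List.pyRange_one_succ_right hn, List.foldl_append, List.map_append, ih]
      simp only [List.foldl_cons, List.foldl_nil, List.map_cons, List.map_nil]
      have he : b * n + min n r + (b + if n < r then 1 else 0) = b * (n + 1) + min (n + 1) r := by
        by_cases h : n < r <;> simp [h, mul_add, mul_one] <;> omega
      rw [he]

theorem compute_chunk_boundaries_eq (length world_size : Int) (h : world_size ≠ 0) :
    compute_chunk_boundaries length world_size = compute_chunk_boundaries_alt length world_size := by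
  unfold compute_chunk_boundaries compute_chunk_boundaries_alt
  rcases lt_or_gt_of_ne h with hneg | hpos
  · simp [PySem.List.pyRange_one_eq_nil (le_of_lt hneg)]
  · have hr : 0 ≤ PySem.Int.mod length world_size := by
      rw [PySem.Int.mod_eq_emod_of_pos hpos]
      exact Int.emod_nonneg length h
    simp only []
    rw [ccb_loop _ _ hr world_size (le_of_lt hpos)]

-- ===== VERDICT (by name: the statement is the Claim_ definition above) =====
theorem compute_chunk_boundaries_spec : Claim_equal_compute_chunk_boundaries := by
  intro length world_size _ hpre
  exact compute_chunk_boundaries_eq length world_size hpre
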